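-- pv_equiv track=rewrite | github.com/Sakamotto/IFES_Prog2 | Programas/libplnbsi.py | intersec
-- ===== SOURCE A (Python) =====
-- def separaPal(pTexto):
-- 	strSeparadores = ' ,!?.:;/-_\\()[]{}><\n\t'
-- 	strBuffer = ""
-- 	lstPalavras = []
--
-- 	for i in range(len(pTexto)):
-- 		if pTexto[i] not in strSeparadores:
-- 			strBuffer += pTexto[i]
-- 		elif strBuffer != "":
-- 			lstPalavras.append(strBuffer)
-- 			strBuffer = ""
-- 		#
-- 	#
-- 	if strBuffer != "":
-- 		lstPalavras.append(strBuffer)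
-- 	#
-- 	return lstPalavras
--
-- def intersec(pTexto1, pTexto2):
-- 	lstTexto1 = separaPal(pTexto1)
-- 	lstTexto2 = separaPal(pTexto2)
-- 	inter = []
--
-- 	for texto1 in lstTexto1:
-- 		for texto2 in lstTexto2:
-- 			if texto1 == texto2:
-- 				if texto1 not in inter:
-- 					inter.append(texto1)
-- 				#
-- 			#
-- 		#
-- 	#
-- 	return inter
-- ===== SOURCE B (Python) =====
-- SEPS = frozenset(' ,!?.:;/-_\\()[]{}><\n\t')
--
-- def intersec(pTexto1, pTexto2):
--     def words(t):
--         out = []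
--         i, n = 0, len(t)
--         while i < n:
--             if t[i] in SEPS:
--                 i += 1
--             else:
--                 j = i + 1
--                 while j < n and t[j] not in SEPS:
--                     j += 1
--                 out.append(t[i:j])
--                 i = j
--         return out
--     w2 = set(words(pTexto2))
--     return [w for w in dict.fromkeys(words(pTexto1)) if w in w2]
-- ===== Notes on version B (the rewrite author's own statement) =====
-- stated objective: idiomatic
-- what changed: Tokenization becomes run-scanning with slices (scan to the next separator, slice the word out) instead of a char-by-char buffer state machine, and the intersection becomes dict.fromkeys order-preserving dedup of text1's words filtered against a set of text2's words instead of a nested scan over text2 with an inline seen-check.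
import Mathlib
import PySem

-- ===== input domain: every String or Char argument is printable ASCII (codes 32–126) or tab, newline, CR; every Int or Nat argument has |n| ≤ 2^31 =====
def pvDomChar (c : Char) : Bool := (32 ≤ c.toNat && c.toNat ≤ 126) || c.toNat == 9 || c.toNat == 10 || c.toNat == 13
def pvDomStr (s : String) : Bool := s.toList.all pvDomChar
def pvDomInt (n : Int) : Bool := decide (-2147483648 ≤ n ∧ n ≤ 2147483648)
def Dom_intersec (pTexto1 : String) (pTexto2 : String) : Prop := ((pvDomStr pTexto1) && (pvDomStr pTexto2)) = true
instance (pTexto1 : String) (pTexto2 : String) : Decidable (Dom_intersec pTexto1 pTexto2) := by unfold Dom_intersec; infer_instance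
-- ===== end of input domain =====

-- B tokenizes by run-scanning (slice out each maximal non-separator run) and intersects via
-- order-preserving dedup of text1's words filtered by a set of text2's words: idiomatic,
-- structurally different from A's char-buffer state machine with a nested membership scan.

-- ===== PORT A =====
-- the separator string of separaPal
def sepChars : List Char := " ,!?.:;/-_\\()[]{}><\n\t".toList

-- the char-by-char loop of separaPal: buffer + accumulator, with the final flush at the end
def sepLoop : List Char → String → List String → List String
  | [], buf, acc => if buf ≠ "" then acc ++ [buf] else acc
  | c :: cs, buf, acc =>
    if c ∉ sepChars then sepLoop cs (buf.push c) acc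
    else if buf ≠ "" then sepLoop cs "" (acc ++ [buf]) else sepLoop cs buf acc

def separaPal (pTexto : String) : List String := sepLoop pTexto.toList "" []

def intersec (pTexto1 : String) (pTexto2 : String) : List String :=
  let lstTexto1 := separaPal pTexto1
  let lstTexto2 := separaPal pTexto2
  lstTexto1.foldl (fun inter texto1 =>
    lstTexto2.foldl (fun inter texto2 =>
      if texto1 = texto2 then (if texto1 ∉ inter then inter ++ [texto1] else inter) else inter)
      inter) []

-- ===== PORT B =====
-- run-scanning tokenizer of Source B: skip a separator, or slice out the word starting here
-- (the char at i plus the run scanned by the inner while loop), then continue after it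
def tokenize : List Char → List String
  | [] => []
  | c :: cs =>
    if c ∈ sepChars then tokenize cs
    else String.ofList (c :: cs.takeWhile (· ∉ sepChars)) :: tokenize (cs.dropWhile (· ∉ sepChars))
  termination_by l => l.length
  decreasing_by
    · simp
    · have h := List.length_dropWhile_le (p := fun x => decide (x ∉ sepChars)) cs
      simp only [List.length_cons]; omega

def intersec_alt (pTexto1 : String) (pTexto2 : String) : List String :=
  let w2 : PySem.Set String := PySem.Set.ofList (tokenize pTexto2.toList)
  (PySem.List.dedup (tokenize pTexto1.toList)).filter (fun w => PySem.Set.contains w2 w)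

-- ===== PRECONDITION & SPEC =====
def Spec_intersec (pTexto1 : String) (pTexto2 : String) (out : List String) : Prop := out = intersec_alt pTexto1 pTexto2
instance (pTexto1 : String) (pTexto2 : String) (out : List String) : Decidable (Spec_intersec pTexto1 pTexto2 out) := by unfold Spec_intersec; infer_instance

-- ===== CLAIM (what is proved, stated in full; the proofs are below) =====
def Claim_equal_intersec : Prop := ∀ (pTexto1 : String) (pTexto2 : String), Dom_intersec pTexto1 pTexto2 → Spec_intersec pTexto1 pTexto2 (intersec pTexto1 pTexto2)

-- ===== LEMMAS AND PROOFS =====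

-- proof-side first-occurrence pick: the words of l1 that occur in l2, first occurrences only
def pick (l2 : List String) : List String → List String → List String
  | [], _ => []
  | t :: ts, seen =>
    if t ∈ l2 ∧ t ∉ seen then t :: pick l2 ts (seen ++ [t]) else pick l2 ts seen

lemma ofList_eq_empty (l : List Char) : (String.ofList l = "") ↔ l = [] := by
  constructor
  · intro h; have := congrArg String.toList h; simpa using this
  · intro h; subst h; rfl

lemma push_ofList (l : List Char) (c : Char) :
    (String.ofList l).push c = String.ofList (l ++ [c]) := by
  have h2 := congrArg String.ofList (show ((String.ofList l).push c).toList = l ++ [c] by simp)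
  rwa [String.ofList_toList] at h2

lemma sepLoop_sep {c : Char} (cs : List Char) (buf : String) (acc : List String)
    (hc : c ∈ sepChars) :
    sepLoop (c :: cs) buf acc =
      if buf ≠ "" then sepLoop cs "" (acc ++ [buf]) else sepLoop cs buf acc := by
  simp [sepLoop, hc]

lemma sepLoop_word {c : Char} (cs : List Char) (buf : String) (acc : List String)
    (hc : c ∉ sepChars) :
    sepLoop (c :: cs) buf acc = sepLoop cs (buf.push c) acc := by
  simp [sepLoop, hc]

-- the maximal-run unfolding of tokenize, valid for every list
lemma tokenize_run (cs : List Char) :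
    tokenize cs = (if cs.takeWhile (· ∉ sepChars) = [] then [] else
      [String.ofList (cs.takeWhile (· ∉ sepChars))]) ++ tokenize (cs.dropWhile (· ∉ sepChars)) := by
  cases cs with
  | nil => simp [tokenize]
  | cons c cs =>
    by_cases hc : c ∈ sepChars
    · simp [tokenize, List.takeWhile, List.dropWhile, hc]
    · simp [tokenize, List.takeWhile, List.dropWhile, hc]

-- A's scanning loop produces the pending-buffer word followed by the run tokenization
lemma sepLoop_eq (cs : List Char) : ∀ (buf : List Char) (acc : List String),
    sepLoop cs (String.ofList buf) acc =
      acc ++ (if buf ++ cs.takeWhile (· ∉ sepChars) = [] then [] else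
        [String.ofList (buf ++ cs.takeWhile (· ∉ sepChars))]) ++
        tokenize (cs.dropWhile (· ∉ sepChars)) := by
  induction cs with
  | nil =>
    intro buf acc
    by_cases hb : buf = [] <;>
      simp [sepLoop, tokenize, hb]
  | cons c cs ih =>
    intro buf acc
    by_cases hc : c ∈ sepChars
    · have hT : (c :: cs).takeWhile (· ∉ sepChars) = [] := by
        simp [List.takeWhile, hc]
      have hD : (c :: cs).dropWhile (· ∉ sepChars) = c :: cs := by
        simp [List.dropWhile, hc]
      have htok : tokenize (c :: cs) = tokenize cs := by simp [tokenize, hc]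
      rw [hT, hD, htok, sepLoop_sep cs _ acc hc]
      by_cases hb : buf = []
      · subst hb
        rw [if_neg (by simp), ih [] acc, tokenize_run cs]
        simp
      · rw [if_pos (by simpa [ofList_eq_empty] using hb),
          show ("" : String) = String.ofList [] from rfl,
          ih [] (acc ++ [String.ofList buf]), tokenize_run cs]
        simp [hb]
    · have hT : (c :: cs).takeWhile (· ∉ sepChars) = c :: cs.takeWhile (· ∉ sepChars) := by
        simp [List.takeWhile, hc]
      have hD : (c :: cs).dropWhile (· ∉ sepChars) = cs.dropWhile (· ∉ sepChars) := by
        simp [List.dropWhile, hc]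
      rw [hT, hD, sepLoop_word cs _ acc hc, push_ofList, ih (buf ++ [c]) acc]
      simp

lemma separaPal_eq (s : String) : separaPal s = tokenize s.toList := by
  have h : separaPal s = sepLoop s.toList (String.ofList []) [] := rfl
  rw [h, sepLoop_eq s.toList [] [], tokenize_run s.toList]
  simp only [List.nil_append]

-- A's inner loop appends texto1 once iff it occurs in l2 and is not yet in inter
lemma inner_foldl (t1 : String) (l2 : List String) : ∀ (inter : List String),
    l2.foldl (fun inter texto2 =>
      if t1 = texto2 then (if t1 ∉ inter then inter ++ [t1] else inter) else inter) inter =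
      if t1 ∈ l2 ∧ t1 ∉ inter then inter ++ [t1] else inter := by
  induction l2 with
  | nil => intro inter; simp
  | cons t2 ts ih =>
    intro inter
    by_cases h : t1 = t2
    · subst h
      by_cases hm : t1 ∈ inter
      · simp only [List.foldl_cons, if_pos (rfl : _ = _), if_neg (not_not_intro hm)]
        rw [ih]; simp [hm]
      · simp only [List.foldl_cons, if_pos rfl, if_pos hm]
        rw [ih]; simp [hm]
    · simp only [List.foldl_cons, if_neg h]
      rw [ih]; simp [List.mem_cons, h]

-- A's outer loop with the summarized step = inter ++ first-occurrence pick
lemma outer_foldl (l2 : List String) : ∀ (l1 inter : List String),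
    l1.foldl (fun inter t => if t ∈ l2 ∧ t ∉ inter then inter ++ [t] else inter) inter =
      inter ++ pick l2 l1 inter := by
  intro l1
  induction l1 with
  | nil => intro inter; simp [pick]
  | cons t ts ih =>
    intro inter
    simp only [List.foldl_cons, pick]
    by_cases h : t ∈ l2 ∧ t ∉ inter
    · rw [if_pos h, if_pos h, ih]; simp
    · rw [if_neg h, if_neg h, ih]

-- B's dedup-then-filter = pick, via a generalized seen-set invariant
lemma dedup_filter_aux (l2 : List String) : ∀ (l1 s1 s2 : List String),
    (∀ x ∈ l2, (x ∈ s1 ↔ x ∈ s2)) →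
    (l1.foldl PySem.Set.add s2).filter (fun w => decide (w ∈ l2)) =
      s2.filter (fun w => decide (w ∈ l2)) ++ pick l2 l1 s1 := by
  intro l1
  induction l1 with
  | nil => intro s1 s2 h; simp [pick]
  | cons t ts ih =>
    intro s1 s2 h
    simp only [List.foldl_cons, pick]
    by_cases hl2 : t ∈ l2
    · by_cases hs1 : t ∈ s1
      · have hs2 : t ∈ s2 := (h t hl2).1 hs1
        rw [show PySem.Set.add s2 t = s2 by
          simp [PySem.Set.add, hs2]]
        simp only [hl2, hs1, true_and, not_true_eq_false, if_false]
        exact ih s1 s2 h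
      · have hs2 : t ∉ s2 := fun hm => hs1 ((h t hl2).2 hm)
        rw [show PySem.Set.add s2 t = s2 ++ [t] by
          simp [PySem.Set.add, hs2]]
        simp only [hl2, hs1, true_and, not_false_eq_true, if_true]
        rw [ih (s1 ++ [t]) (s2 ++ [t]) (by intro x hx; simp [h x hx])]
        simp [hl2]
    · simp only [hl2, false_and, if_false]
      by_cases hs2 : t ∈ s2
      · rw [show PySem.Set.add s2 t = s2 by
          simp [PySem.Set.add, hs2]]
        exact ih s1 s2 h
      · rw [show PySem.Set.add s2 t = s2 ++ [t] by
          simp [PySem.Set.add, hs2]]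
        rw [ih s1 (s2 ++ [t]) (by
          intro x hx
          have hne : x ≠ t := fun he => hl2 (he ▸ hx)
          simp [h x hx, hne])]
        simp [hl2]

lemma dedup_filter (l1 l2 : List String) :
    (PySem.List.dedup l1).filter (fun w => decide (w ∈ l2)) = pick l2 l1 [] := by
  have h := dedup_filter_aux l2 l1 [] [] (by simp)
  simpa [PySem.List.dedup_eq_ofList, PySem.Set.ofList_eq_foldl] using h

-- ===== VERDICT (by name: the statement is the Claim_ definition above) =====
theorem intersec_spec : Claim_equal_intersec := by
  intro p1 p2 _
  show intersec p1 p2 = intersec_alt p1 p2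
  have hA : intersec p1 p2 =
      (tokenize p1.toList).foldl
        (fun inter t => if t ∈ tokenize p2.toList ∧ t ∉ inter then inter ++ [t] else inter) [] := by
    show (separaPal p1).foldl (fun inter texto1 =>
        (separaPal p2).foldl (fun inter texto2 =>
          if texto1 = texto2 then (if texto1 ∉ inter then inter ++ [texto1] else inter) else inter)
          inter) [] = _
    rw [separaPal_eq, separaPal_eq]
    exact List.foldl_ext _ _ []
      (fun inter => fun t _ => inner_foldl t (tokenize p2.toList) inter)
  have hB : intersec_alt p1 p2 =
      (PySem.List.dedup (tokenize p1.toList)).filter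
        (fun w => decide (w ∈ tokenize p2.toList)) := by
    show (PySem.List.dedup (tokenize p1.toList)).filter
        (fun w => PySem.Set.contains (PySem.Set.ofList (tokenize p2.toList)) w) = _
    exact List.filter_congr (fun w _ => by
      simp [PySem.Set.mem_ofList])
  rw [hA, hB, outer_foldl, dedup_filter]
  simp
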